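-- pv_equiv track=rewrite | github.com/Gustavjiversen01/OSW | localdictate/settings.py | validate_hotkey
-- ===== SOURCE A (Python) =====
-- _KNOWN_MODIFIERS = {"ctrl", "shift", "alt", "super"}
--
-- _KNOWN_KEYS = {
--     "space",
--     "tab",
--     "enter",
--     "esc",
-- }
--
-- def validate_hotkey(hotkey_str: str) -> bool:
--     """Validate hotkey string: non-empty, known keys, at least one non-modifier."""
--     parts = {k.strip().lower() for k in hotkey_str.split("+") if k.strip()}
--     if not parts:
--         return False
--     # Every part must be a known modifier, a known special key, or a single alnum char
--     for p in parts:
--         if p in _KNOWN_MODIFIERS or p in _KNOWN_KEYS: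
--             continue
--         if len(p) == 1 and p.isalnum():
--             continue
--         return False
--     non_modifiers = parts - _KNOWN_MODIFIERS
--     return len(non_modifiers) >= 1
-- ===== SOURCE B (Python) =====
-- _MODIFIERS = ("ctrl", "shift", "alt", "super")
-- _SPECIALS = ("space", "tab", "enter", "esc")
--
-- def validate_hotkey(hotkey_str: str) -> bool:
--     """Validate hotkey string: non-empty, known keys, at least one non-modifier."""
--     has_non_modifier = False
--     for raw in hotkey_str.split("+"):
--         p = raw.strip().lower()
--         if not p:
--             continue
--         if p in _MODIFIERS:
--             continue
--         if p in _SPECIALS or (len(p) == 1 and p.isalnum()):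
--             has_non_modifier = True
--             continue
--         return False
--     return has_non_modifier
-- ===== Notes on version B (the rewrite author's own statement) =====
-- stated objective: simpler
-- what changed: Replaced the set-comprehension + per-part loop + set-difference count with a single pass over the split pieces carrying a has_non_modifier flag, building no set at all.
import Mathlib
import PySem

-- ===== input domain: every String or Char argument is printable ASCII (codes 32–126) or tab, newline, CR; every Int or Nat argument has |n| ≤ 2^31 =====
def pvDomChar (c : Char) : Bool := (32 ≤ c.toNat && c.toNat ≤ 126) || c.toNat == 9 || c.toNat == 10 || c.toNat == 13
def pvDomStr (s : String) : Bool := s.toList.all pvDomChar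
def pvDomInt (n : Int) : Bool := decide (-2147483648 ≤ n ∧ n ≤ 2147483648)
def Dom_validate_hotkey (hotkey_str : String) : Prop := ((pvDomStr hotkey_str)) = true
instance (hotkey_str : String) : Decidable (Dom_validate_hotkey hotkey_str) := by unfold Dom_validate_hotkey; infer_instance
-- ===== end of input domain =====

-- B replaces A's set comprehension, per-part loop and set-difference count by one pass over the
-- split pieces carrying a has_non_modifier flag (no set is built); same return value, objective: simpler.

-- ===== PORT A =====
def pvKnownModifiers : PySem.Set String := PySem.Set.ofList ["ctrl", "shift", "alt", "super"]
def pvKnownKeys : PySem.Set String := PySem.Set.ofList ["space", "tab", "enter", "esc"]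

-- the 'for p in parts' loop: result is order-independent (all-or-nothing check, then a set count)
def pvLoopA (parts : PySem.Set String) : List String → Bool
  | [] => decide (1 ≤ (PySem.Set.diff parts pvKnownModifiers).length)
  | p :: rest =>
    if pvKnownModifiers.contains p || pvKnownKeys.contains p then pvLoopA parts rest
    else if PySem.Str.len p == 1 && PySem.Str.strIsalnum p then pvLoopA parts rest
    else false

def validate_hotkey (hotkey_str : String) : Bool :=
  let parts : PySem.Set String :=
    PySem.Set.ofList (((PySem.Str.split? hotkey_str "+").getD []).filterMap
      (fun k => if PySem.Str.strip k ≠ "" then some (PySem.Str.lower (PySem.Str.strip k)) else none))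
  if parts = [] then false
  else pvLoopA parts parts

-- ===== PORT B =====
def pvModifiersB : List String := ["ctrl", "shift", "alt", "super"]
def pvSpecialsB : List String := ["space", "tab", "enter", "esc"]

def pvLoopB (flag : Bool) : List String → Bool
  | [] => flag
  | raw :: rest =>
    let p := PySem.Str.lower (PySem.Str.strip raw)
    if p = "" then pvLoopB flag rest
    else if pvModifiersB.contains p then pvLoopB flag rest
    else if pvSpecialsB.contains p || (PySem.Str.len p == 1 && PySem.Str.strIsalnum p) then
      pvLoopB true rest
    else false

def validate_hotkey_alt (hotkey_str : String) : Bool :=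
  pvLoopB false ((PySem.Str.split? hotkey_str "+").getD [])

-- ===== PRECONDITION & SPEC =====
def Spec_validate_hotkey (hotkey_str : String) (out : Bool) : Prop := out = validate_hotkey_alt hotkey_str
instance (hotkey_str : String) (out : Bool) : Decidable (Spec_validate_hotkey hotkey_str out) := by unfold Spec_validate_hotkey; infer_instance

-- ===== CLAIM (what is proved, stated in full; the proofs are below) =====
def Claim_equal_validate_hotkey : Prop := ∀ (hotkey_str : String), Dom_validate_hotkey hotkey_str → Spec_validate_hotkey hotkey_str (validate_hotkey hotkey_str)

-- ===== LEMMAS AND PROOFS =====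

theorem pvMods_eq : pvKnownModifiers = pvModifiersB := by decide
theorem pvKeys_eq : pvKnownKeys = pvSpecialsB := by decide

theorem pvContains_mods (p : String) :
    pvKnownModifiers.contains p = pvModifiersB.contains p := by rw [pvMods_eq]; rfl
theorem pvContains_keys (p : String) :
    pvKnownKeys.contains p = pvSpecialsB.contains p := by rw [pvKeys_eq]; rfl

-- a part is accepted by both programs' per-part test
def pvValid (p : String) : Bool :=
  (pvModifiersB.contains p || pvSpecialsB.contains p)
    || (PySem.Str.len p == 1 && PySem.Str.strIsalnum p)

-- the processed parts: stripped-lowered nonempty pieces of the split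
def pvProc (raws : List String) : List String :=
  raws.filterMap (fun k => if PySem.Str.strip k ≠ "" then some (PySem.Str.lower (PySem.Str.strip k)) else none)

theorem pvLower_eq_empty_iff (t : String) : PySem.Str.lower t = "" ↔ t = "" := by
  constructor
  · intro h
    have hlen : (PySem.Str.lower t).toList.length = t.toList.length := by
      simp [PySem.Str.toList_lower, PySem.Chars.lower]
    rw [h] at hlen
    have ht : t.toList = [] := List.eq_nil_of_length_eq_zero (by simpa using hlen.symm)
    have := congrArg String.ofList ht
    simpa using this
  · intro h; subst h; decide

theorem pvLoopA_eq (parts : PySem.Set String) (l : List String) :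
    pvLoopA parts l =
      if l.all pvValid then decide (1 ≤ (PySem.Set.diff parts pvKnownModifiers).length) else false := by
  induction l with
  | nil => simp [pvLoopA]
  | cons p rest ih =>
    simp only [pvLoopA, List.all_cons]
    by_cases h1 : (pvModifiersB.contains p || pvSpecialsB.contains p) = true
    · rw [if_pos (by rw [pvContains_mods, pvContains_keys]; exact h1), ih]
      have hv : pvValid p = true := by simp only [pvValid, h1, Bool.true_or]
      simp only [hv, Bool.true_and]
    · have h1f := Bool.not_eq_true _ |>.mp h1
      rw [if_neg (by rw [pvContains_mods, pvContains_keys]; exact h1)]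
      by_cases h2 : (PySem.Str.len p == 1 && PySem.Str.strIsalnum p) = true
      · rw [if_pos h2, ih]
        have hv : pvValid p = true := by
          simp only [pvValid, h1f, Bool.false_or]; exact h2
        simp only [hv, Bool.true_and]
      · have h2f := Bool.not_eq_true _ |>.mp h2
        rw [if_neg h2]
        have hv : pvValid p = false := by
          simp only [pvValid, h1f, Bool.false_or]; exact h2f
        simp [hv]

theorem pvLoopB_eq (flag : Bool) (raws : List String) :
    pvLoopB flag raws =
      if (pvProc raws).all pvValid then
        (flag || (pvProc raws).any fun p => !pvModifiersB.contains p)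
      else false := by
  induction raws generalizing flag with
  | nil => simp [pvLoopB, pvProc]
  | cons raw rest ih =>
    by_cases hs : PySem.Str.strip raw = ""
    · have hp : PySem.Str.lower (PySem.Str.strip raw) = "" := (pvLower_eq_empty_iff _).2 hs
      simp only [pvLoopB, hp, pvProc, List.filterMap_cons, hs]
      simpa [pvProc] using ih flag
    · have hp : PySem.Str.lower (PySem.Str.strip raw) ≠ "" := by
        simpa [pvLower_eq_empty_iff] using hs
      have hproc : pvProc (raw :: rest)
          = PySem.Str.lower (PySem.Str.strip raw) :: pvProc rest := by
        simp [pvProc, hs]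
      set p := PySem.Str.lower (PySem.Str.strip raw) with hpdef
      simp only [pvLoopB, hproc, List.all_cons, List.any_cons]
      rw [← hpdef, if_neg hp]
      by_cases h1 : pvModifiersB.contains p = true
      · rw [if_pos h1, ih flag]
        have hv : pvValid p = true := by simp only [pvValid, h1, Bool.true_or]
        have hnm : (!pvModifiersB.contains p) = false := by rw [h1]; rfl
        simp only [hv, Bool.true_and, hnm, Bool.false_or]
      · have h1f := Bool.not_eq_true _ |>.mp h1
        rw [if_neg h1]
        by_cases h2 : (pvSpecialsB.contains p || (PySem.Str.len p == 1 && PySem.Str.strIsalnum p)) = true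
        · rw [if_pos h2, ih true]
          have hv : pvValid p = true := by
            simp only [pvValid, h1f, Bool.false_or]; exact h2
          have hnm : (!pvModifiersB.contains p) = true := by rw [h1f]; rfl
          simp only [hv, Bool.true_and, hnm, Bool.true_or, Bool.or_true]
        · have h2f := Bool.not_eq_true _ |>.mp h2
          rw [if_neg h2]
          have hv : pvValid p = false := by
            simp only [pvValid, h1f, Bool.false_or]; exact h2f
          simp [hv]

theorem pvOfList_eq_nil_iff (ps : List String) : PySem.Set.ofList ps = [] ↔ ps = [] := by
  constructor
  · intro h
    cases ps with
    | nil => rfl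
    | cons x xs =>
      have hx : x ∈ PySem.Set.ofList (x :: xs) := (PySem.Set.mem_ofList _ _).2 (by simp)
      rw [h] at hx; cases hx
  · intro h; simp [h, PySem.Set.ofList, PySem.Set.empty]

theorem pvAll_ofList (ps : List String) :
    (PySem.Set.ofList ps).all pvValid = ps.all pvValid := by
  rw [Bool.eq_iff_iff]
  simp only [List.all_eq_true]
  constructor
  · intro h p hp; exact h p ((PySem.Set.mem_ofList _ _).2 hp)
  · intro h p hp; exact h p ((PySem.Set.mem_ofList _ _).1 hp)

theorem pvDiff_count (ps : List String) :
    decide (1 ≤ (PySem.Set.diff (PySem.Set.ofList ps) pvKnownModifiers).length)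
      = ps.any fun p => !pvModifiersB.contains p := by
  rw [Bool.eq_iff_iff, decide_eq_true_eq, List.any_eq_true]
  simp only [PySem.Set.diff, pvMods_eq, PySem.Set.contains]
  constructor
  · intro h
    have hne : List.filter (fun x => !pvModifiersB.contains x) (PySem.Set.ofList ps) ≠ [] := by
      intro he; rw [he] at h; simp at h
    obtain ⟨x, hx⟩ := List.exists_mem_of_ne_nil _ hne
    obtain ⟨hx1, hx2⟩ := List.mem_filter.1 hx
    exact ⟨x, (PySem.Set.mem_ofList _ _).1 hx1, by simpa using hx2⟩
  · rintro ⟨x, hx, hc⟩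
    have hmem : x ∈ List.filter (fun x => !pvModifiersB.contains x) (PySem.Set.ofList ps) :=
      List.mem_filter.2 ⟨(PySem.Set.mem_ofList _ _).2 hx, by simpa using hc⟩
    exact List.length_pos_of_mem hmem

-- ===== VERDICT (by name: the statement is the Claim_ definition above) =====
theorem validate_hotkey_spec : Claim_equal_validate_hotkey := by
  intro s _
  unfold Spec_validate_hotkey validate_hotkey validate_hotkey_alt
  rw [pvLoopB_eq]
  set raws := (PySem.Str.split? s "+").getD [] with hraws
  set ps := pvProc raws with hps
  show (if PySem.Set.ofList ps = [] then false else pvLoopA (PySem.Set.ofList ps) (PySem.Set.ofList ps)) = _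
  by_cases hnil : ps = []
  · rw [hnil]; decide
  · rw [if_neg (by simpa [pvOfList_eq_nil_iff] using hnil)]
    rw [pvLoopA_eq, pvAll_ofList, pvDiff_count]
    simp
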